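-- pv_equiv track=rewrite | github.com/elemindreda/hoslab_service | .ipynb_checkpoints/dgc06-checkpoint.py | latching
-- ===== SOURCE A (Python) =====
-- def latching(latch1, latch2, latch3, latch4):
--     latch = []
--     latch = [latch1, latch2, latch3, latch4]
--     for i in range(0, len(latch)):
--         if latch[i] == '1':
--             latch[i] = 'Yes'
--             for i in range(0, i):
--                 latch[i] = 'Yes'
--
--         else:
--             latch[i] = 'No'
--     return latch
-- ===== SOURCE B (Python) =====
-- def latching(latch1, latch2, latch3, latch4):
--     xs = [latch1, latch2, latch3, latch4]
--     m = -1
--     for i, v in enumerate(xs):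
--         if v == '1':
--             m = i
--     return ['Yes' if i <= m else 'No' for i in range(4)]
-- ===== Notes on version B (the rewrite author's own statement) =====
-- stated objective: simpler
-- what changed: B replaces A's nested carry-back overwrite loops with a single pass that records the last index holding '1' and then emits 'Yes' up to that index and 'No' after it.
import Mathlib
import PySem

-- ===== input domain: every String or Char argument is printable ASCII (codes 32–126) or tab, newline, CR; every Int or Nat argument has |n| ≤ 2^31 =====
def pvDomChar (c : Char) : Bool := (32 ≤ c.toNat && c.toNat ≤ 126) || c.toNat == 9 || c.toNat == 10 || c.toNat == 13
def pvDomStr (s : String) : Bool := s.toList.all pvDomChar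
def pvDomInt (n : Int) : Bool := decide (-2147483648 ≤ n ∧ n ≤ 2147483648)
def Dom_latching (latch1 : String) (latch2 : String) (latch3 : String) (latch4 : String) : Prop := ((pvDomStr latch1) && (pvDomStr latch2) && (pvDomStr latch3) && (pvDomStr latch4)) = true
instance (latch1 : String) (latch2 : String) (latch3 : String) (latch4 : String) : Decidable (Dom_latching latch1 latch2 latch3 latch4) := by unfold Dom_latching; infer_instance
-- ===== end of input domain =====

-- B replaces A's nested carry-back overwrite with one pass computing the last index holding '1' (objective: simpler).


-- ===== PORT A =====
-- A: for each i, if latch[i] == '1' set it to 'Yes' and overwrite all earlier slots to 'Yes', else set it to 'No'.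
def latching (latch1 : String) (latch2 : String) (latch3 : String) (latch4 : String) : List String :=
  (List.range 4).foldl (fun latch i =>
    if latch.getD i "" = "1" then
      (List.range i).foldl (fun l j => l.set j "Yes") (latch.set i "Yes")
    else latch.set i "No") [latch1, latch2, latch3, latch4]

-- ===== PORT B =====
-- B (simpler): one pass finds the last index m with value '1'; output is 'Yes' for i ≤ m, 'No' after.
def latching_alt (latch1 : String) (latch2 : String) (latch3 : String) (latch4 : String) : List String :=
  let xs := [latch1, latch2, latch3, latch4]
  let m : Int := xs.zipIdx.foldl (fun acc p => if p.1 = "1" then (p.2 : Int) else acc) (-1)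
  (List.range 4).map (fun i => if (i : Int) ≤ m then "Yes" else "No")

-- ===== PRECONDITION & SPEC =====
def Spec_latching (latch1 : String) (latch2 : String) (latch3 : String) (latch4 : String) (out : List String) : Prop := out = latching_alt latch1 latch2 latch3 latch4
instance (latch1 : String) (latch2 : String) (latch3 : String) (latch4 : String) (out : List String) : Decidable (Spec_latching latch1 latch2 latch3 latch4 out) := by unfold Spec_latching; infer_instance

-- ===== CLAIM (what is proved, stated in full; the proofs are below) =====
def Claim_equal_latching : Prop := ∀ (latch1 : String) (latch2 : String) (latch3 : String) (latch4 : String), Dom_latching latch1 latch2 latch3 latch4 → Spec_latching latch1 latch2 latch3 latch4 (latching latch1 latch2 latch3 latch4)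

-- ===== LEMMAS AND PROOFS =====

-- ===== VERDICT (by name: the statement is the Claim_ definition above) =====
theorem latching_spec : Claim_equal_latching := by
  intro l1 l2 l3 l4 _
  unfold Spec_latching latching latching_alt
  by_cases h1 : l1 = "1" <;> by_cases h2 : l2 = "1" <;>
    by_cases h3 : l3 = "1" <;> by_cases h4 : l4 = "1" <;>
    simp [h1, h2, h3, h4, List.range_succ, List.zipIdx]
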